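-- pv_equiv track=rewrite | github.com/SH-Lee0916/CodeWars_solutions_python | 4kyu/twice_linear.py | dbl_linear
-- ===== SOURCE A (Python) =====
-- def dbl_linear(n):
--     u = [1]
--
--     y_idx, z_idx = 0, 0
--
--     for idx in range(n):
--         y = 2 * u[y_idx] + 1
--         z = 3 * u[z_idx] + 1
--         if y < z:
--             u.append(y)
--             y_idx += 1
--         elif y > z:
--             u.append(z)
--             z_idx += 1
--         elif y == z:
--             u.append(y)
--             y_idx += 1
--             z_idx += 1
--
--     return u[n]
-- ===== SOURCE B (Python) =====
-- def dbl_linear(n):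
--     from collections import deque
--     q2, q3 = deque(), deque()
--     x = 1
--     for _ in range(n):
--         q2.append(2 * x + 1)
--         q3.append(3 * x + 1)
--         y, z = q2[0], q3[0]
--         x = min(y, z)
--         if y <= z:
--             q2.popleft()
--         if z <= y:
--             q3.popleft()
--     return x
-- ===== Notes on version B (the rewrite author's own statement) =====
-- stated objective: alternative
-- what changed: Replaces the growing result list with two back-pointer indices by two FIFO queues of pending candidates (2x+1 / 3x+1), keeping only the current value instead of the whole sequence.
-- outside the precondition, e.g. on dbl_linear(-2): A raises IndexError, B returns 1
import Mathlib
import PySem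

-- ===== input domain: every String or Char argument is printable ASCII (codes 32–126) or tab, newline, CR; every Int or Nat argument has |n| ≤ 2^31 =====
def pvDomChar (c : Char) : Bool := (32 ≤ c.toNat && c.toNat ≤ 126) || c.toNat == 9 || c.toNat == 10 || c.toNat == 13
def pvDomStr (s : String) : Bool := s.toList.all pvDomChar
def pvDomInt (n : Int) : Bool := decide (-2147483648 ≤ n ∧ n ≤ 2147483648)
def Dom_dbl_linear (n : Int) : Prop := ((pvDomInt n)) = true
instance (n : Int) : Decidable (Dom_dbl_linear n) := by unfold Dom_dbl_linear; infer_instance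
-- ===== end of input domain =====

-- B replaces the list-with-two-indices merge by two FIFO queues of pending candidates (alternative structure, same cost).

-- ===== PORT A =====
-- Python list indexing u[i] on an Array (Python's list: O(1) append and index): exact — negative i counts
-- from the end, default is returned only out of range (unreachable under Pre_ except the final u[n])
def pyGetDArr (a : Array Int) (i : Int) (d : Int) : Int :=
  let j := if i < 0 then i + (a.size : Int) else i
  if h : 0 ≤ j ∧ j.toNat < a.size then a[j.toNat] else d

-- one iteration of A's for-loop over state (u, y_idx, z_idx); u.append = Array.push
def stepA (st : Array Int × Int × Int) (_i : Int) : Array Int × Int × Int :=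
  let u := st.1
  let yi := st.2.1
  let zi := st.2.2
  let y := 2 * pyGetDArr u yi 0 + 1
  let z := 3 * pyGetDArr u zi 0 + 1
  if y < z then (u.push y, yi + 1, zi)
  else if y > z then (u.push z, yi, zi + 1)
  else (u.push y, yi + 1, zi + 1)

def dbl_linear (n : Int) : Int :=
  let s := (PySem.List.pyRange 0 n 1).foldl stepA (#[1], 0, 0)
  pyGetDArr s.1 n 0

-- ===== PORT B =====
-- a deque used FIFO (append right, pop/peek left), as the standard front/back pair of lists; exact:
-- qToL below is the held sequence, and append/peek/popleft are O(1) amortised as in CPython's deque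
def qPush (q : List Int × List Int) (v : Int) : List Int × List Int := (q.1, v :: q.2)

def qPeekD (q : List Int × List Int) (d : Int) : Int :=
  match q.1 with
  | x :: _ => x
  | [] => match q.2.reverse with
          | x :: _ => x
          | [] => d

def qPop (q : List Int × List Int) : List Int × List Int :=
  match q.1 with
  | _ :: t => (t, q.2)
  | [] => (q.2.reverse.tail, [])

-- one iteration of B's for-loop over state (x, q2, q3); q[0] = qPeekD, popleft = qPop
def stepB (st : Int × (List Int × List Int) × (List Int × List Int)) (_i : Int) :
    Int × (List Int × List Int) × (List Int × List Int) :=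
  let x := st.1
  let q2 := qPush st.2.1 (2 * x + 1)
  let q3 := qPush st.2.2 (3 * x + 1)
  let y := qPeekD q2 0
  let z := qPeekD q3 0
  (min y z, if y ≤ z then qPop q2 else q2, if z ≤ y then qPop q3 else q3)

def dbl_linear_alt (n : Int) : Int :=
  ((PySem.List.pyRange 0 n 1).foldl stepB (1, ([], []), ([], []))).1

-- ===== PRECONDITION & SPEC =====
-- Pre_ excludes exactly n ≤ -2, where A's final u[n] raises IndexError (u has 1 element there).
def Pre_dbl_linear (n : Int) : Prop := -1 ≤ n
instance (n : Int) : Decidable (Pre_dbl_linear n) := by unfold Pre_dbl_linear; infer_instance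
def pvWitness_dbl_linear : Int := 5

def Spec_dbl_linear (n : Int) (out : Int) : Prop := out = dbl_linear_alt n
instance (n : Int) (out : Int) : Decidable (Spec_dbl_linear n out) := by unfold Spec_dbl_linear; infer_instance

-- ===== CLAIM (what is proved, stated in full; the proofs are below) =====
def Claim_equal_dbl_linear : Prop := ∀ (n : Int), Dom_dbl_linear n → Pre_dbl_linear n → Spec_dbl_linear n (dbl_linear n)

-- ===== LEMMAS AND PROOFS =====

-- the sequence a queue holds
def qToL (q : List Int × List Int) : List Int := q.1 ++ q.2.reverse

lemma qToL_push (q : List Int × List Int) (v : Int) : qToL (qPush q v) = qToL q ++ [v] := by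
  cases q; simp [qPush, qToL]

lemma qPeekD_eq (q : List Int × List Int) (d : Int) : qPeekD q d = (qToL q).headD d := by
  obtain ⟨f, b⟩ := q
  cases f with
  | cons x t => simp [qPeekD, qToL]
  | nil =>
    cases hb : b.reverse with
    | nil => simp [qPeekD, qToL, hb]
    | cons x t => simp [qPeekD, qToL, hb]

lemma qToL_pop (q : List Int × List Int) : qToL (qPop q) = (qToL q).tail := by
  obtain ⟨f, b⟩ := q
  cases f with
  | cons x t => simp [qPop, qToL]
  | nil => simp [qPop, qToL]

lemma pyGetDArr_ofNat (a : Array Int) (n : Nat) (d : Int) (h : n < a.size) :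
    pyGetDArr a (n : Int) d = a.toList[n]'(by simpa using h) := by
  have h1 : ¬ ((n : Int) < 0) := by omega
  simp [pyGetDArr, h1, h]

-- the bisimulation invariant between A's state (u, y_idx, z_idx) and B's state (x, q2, q3):
-- u = u0 ++ [x] with x the latest value, and each queue holds the mapped suffix of u0 past its index
def DblInv (a : Array Int × Int × Int) (b : Int × (List Int × List Int) × (List Int × List Int)) : Prop :=
  ∃ (u0 : List Int) (x : Int) (yi zi : Nat),
    a.1.toList = u0 ++ [x] ∧ a.2.1 = (yi : Int) ∧ a.2.2 = (zi : Int) ∧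
    yi ≤ u0.length ∧ zi ≤ u0.length ∧
    b.1 = x ∧
    qToL b.2.1 = (u0.drop yi).map (fun t => 2 * t + 1) ∧
    qToL b.2.2 = (u0.drop zi).map (fun t => 3 * t + 1)

lemma inv_step (a : Array Int × Int × Int) (b : Int × (List Int × List Int) × (List Int × List Int))
    (i : Int) (h : DblInv a b) : DblInv (stepA a i) (stepB b i) := by
  obtain ⟨u0, x, yi, zi, hu, hyi, hzi, hyl, hzl, hx, hq2, hq3⟩ := h
  obtain ⟨u, yI, zI⟩ := a
  obtain ⟨bx, q2, q3⟩ := b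
  dsimp only at hu hyi hzi hx hq2 hq3
  subst hyi hzi hx
  have hulen : u.toList.length = u0.length + 1 := by rw [hu]; simp
  have hylt : yi < u.size := by simp at hulen ⊢; omega
  have hzlt : zi < u.size := by simp at hulen ⊢; omega
  have hylt' : yi < (u0 ++ [bx]).length := by simp; omega
  have hzlt' : zi < (u0 ++ [bx]).length := by simp; omega
  have hdy : (u0 ++ [bx]).drop yi = (u0 ++ [bx])[yi] :: (u0 ++ [bx]).drop (yi + 1) :=
    List.drop_eq_getElem_cons hylt'
  have hdz : (u0 ++ [bx]).drop zi = (u0 ++ [bx])[zi] :: (u0 ++ [bx]).drop (zi + 1) :=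
    List.drop_eq_getElem_cons hzlt'
  have hq2e : (u0.drop yi).map (fun t => 2 * t + 1) ++ [2 * bx + 1]
      = (2 * (u0 ++ [bx])[yi] + 1) :: ((u0 ++ [bx]).drop (yi + 1)).map (fun t => 2 * t + 1) := by
    have h := congrArg (List.map (fun t => 2 * t + 1)) hdy
    rw [List.drop_append_of_le_length hyl] at h
    simpa only [List.map_append, List.map_cons, List.map_nil] using h
  have hq3e : (u0.drop zi).map (fun t => 3 * t + 1) ++ [3 * bx + 1]
      = (3 * (u0 ++ [bx])[zi] + 1) :: ((u0 ++ [bx]).drop (zi + 1)).map (fun t => 3 * t + 1) := by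
    have h := congrArg (List.map (fun t => 3 * t + 1)) hdz
    rw [List.drop_append_of_le_length hzl] at h
    simpa only [List.map_append, List.map_cons, List.map_nil] using h
  have hgetA : ∀ (k : Nat) (hk : k < u.size), u.toList[k]'(by simpa using hk) = (u0 ++ [bx])[k]'(by have := hulen; simp at this ⊢; omega) := by
    intro k hk; simp only [hu]
  simp only [stepA, stepB, pyGetDArr_ofNat u yi 0 hylt, pyGetDArr_ofNat u zi 0 hzlt,
    hgetA yi hylt, hgetA zi hzlt, qPeekD_eq, qToL_push, hq2, hq3, hq2e, hq3e, List.headD_cons]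
  set gy := (u0 ++ [bx])[yi] with hgy
  set gz := (u0 ++ [bx])[zi] with hgz
  rcases lt_trichotomy (2 * gy + 1) (3 * gz + 1) with hc | hc | hc
  · rw [if_pos hc, if_pos (le_of_lt hc), if_neg (by omega : ¬ 3 * gz + 1 ≤ 2 * gy + 1)]
    refine ⟨u0 ++ [bx], 2 * gy + 1, yi + 1, zi, by simp [hu], by push_cast; ring, rfl,
      by simp at hylt' ⊢; omega, by simp at hzlt' ⊢; omega, by omega, ?_, ?_⟩
    · dsimp only; rw [qToL_pop, qToL_push, hq2, hq2e]; rfl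
    · dsimp only; rw [qToL_push, hq3, hq3e, hdz, List.map_cons]
  · rw [if_neg (by omega : ¬ 2 * gy + 1 < 3 * gz + 1),
      if_neg (by omega : ¬ 2 * gy + 1 > 3 * gz + 1),
      if_pos (le_of_eq hc), if_pos (le_of_eq hc.symm)]
    refine ⟨u0 ++ [bx], 2 * gy + 1, yi + 1, zi + 1, by simp [hu], by push_cast; ring,
      by push_cast; ring, by simp at hylt' ⊢; omega, by simp at hzlt' ⊢; omega, by omega, ?_, ?_⟩
    · dsimp only; rw [qToL_pop, qToL_push, hq2, hq2e]; rfl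
    · dsimp only; rw [qToL_pop, qToL_push, hq3, hq3e]; rfl
  · rw [if_neg (by omega : ¬ 2 * gy + 1 < 3 * gz + 1), if_pos hc,
      if_neg (by omega : ¬ 2 * gy + 1 ≤ 3 * gz + 1), if_pos (le_of_lt hc)]
    refine ⟨u0 ++ [bx], 3 * gz + 1, yi, zi + 1, by simp [hu], rfl, by push_cast; ring,
      by simp at hylt' ⊢; omega, by simp at hzlt' ⊢; omega, by omega, ?_, ?_⟩
    · dsimp only; rw [qToL_push, hq2, hq2e, hdy, List.map_cons]
    · dsimp only; rw [qToL_pop, qToL_push, hq3, hq3e]; rfl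

lemma inv_fold (l : List Int) (a : Array Int × Int × Int)
    (b : Int × (List Int × List Int) × (List Int × List Int))
    (h : DblInv a b) : DblInv (l.foldl stepA a) (l.foldl stepB b) := by
  induction l generalizing a b with
  | nil => exact h
  | cons i t ih => exact ih _ _ (inv_step a b i h)

lemma lenA_step (st : Array Int × Int × Int) (i : Int) :
    (stepA st i).1.size = st.1.size + 1 := by
  unfold stepA; dsimp only; split_ifs <;> simp

lemma lenA_fold (l : List Int) (st : Array Int × Int × Int) :
    (l.foldl stepA st).1.size = st.1.size + l.length := by
  induction l generalizing st with
  | nil => simp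
  | cons i t ih => simp only [List.foldl_cons, List.length_cons, ih, lenA_step]; omega

-- ===== VERDICT (by name: the statement is the Claim_ definition above) =====
theorem dbl_linear_spec : Claim_equal_dbl_linear := by
  intro n _ hpre
  unfold Pre_dbl_linear at hpre
  unfold Spec_dbl_linear
  by_cases hn : 0 ≤ n
  · simp only [dbl_linear, dbl_linear_alt]
    have hinv : DblInv ((PySem.List.pyRange 0 n 1).foldl stepA (#[1], 0, 0))
        ((PySem.List.pyRange 0 n 1).foldl stepB (1, ([], []), ([], []))) := by
      apply inv_fold
      exact ⟨[], 1, 0, 0, rfl, by simp, by simp, by simp, by simp, rfl, rfl, rfl⟩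
    obtain ⟨u0, x, yi, zi, hu, -, -, -, -, hx, -, -⟩ := hinv
    have hlen := lenA_fold (PySem.List.pyRange 0 n 1) (#[1], 0, 0)
    rw [PySem.List.length_pyRange_one] at hlen
    have hlen' := congrArg List.length hu
    simp only [Array.length_toList, List.length_append, List.length_cons, List.length_nil] at hlen'
    have hu0len : u0.length = n.toNat := by simp at hlen; omega
    rw [hx]
    have hcast : n = ((u0.length : Nat) : Int) := by rw [hu0len]; omega
    have hsz : u0.length < ((PySem.List.pyRange 0 n 1).foldl stepA (#[1], 0, 0)).1.size := by omega
    have hget := pyGetDArr_ofNat _ u0.length 0 hsz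
    rw [← hcast] at hget
    rw [hget]
    simp [hu]
  · have hn1 : n = -1 := by omega
    subst hn1
    decide
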